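-- pv_equiv track=rewrite | github.com/shaoyefeng/SoAL_Screening | code20211130_workstation_delete/fpt_plot.py | find_ac
-- ===== SOURCE A (Python) =====
-- def find_ac(ov, n=3):
--     c = 0
--     for i, o in enumerate(ov):
--         if o:
--             c += 1
--             if c >= n:
--                 return i
--         else:
--             c = 0
--     return 0
-- ===== SOURCE B (Python) =====
-- from itertools import groupby
--
--
-- def find_ac(ov, n=3):
--     base = 0
--     for truthy, grp in groupby(ov, key=bool):
--         run_len = sum(1 for _ in grp)
--         if truthy and run_len >= n:
--             return base + n - 1
--         base += run_len
--     return 0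
-- ===== Notes on version B (the rewrite author's own statement) =====
-- stated objective: alternative
-- what changed: B replaces A's per-element consecutive-truthy counter with a run-based scan: groupby(ov, key=bool) yields maximal runs and the first truthy run of length >= n yields base + n - 1 directly; Pre_ restricts n to the natural domain n >= 1 (for n <= 0 A's returning the index of the first truthy element is an artefact of its counter test).
-- outside the precondition, e.g. on find_ac([5], 0): A returns 0, B returns -1; on find_ac([0, 7, 7], -1): A returns 1, B returns -1
import Mathlib
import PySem

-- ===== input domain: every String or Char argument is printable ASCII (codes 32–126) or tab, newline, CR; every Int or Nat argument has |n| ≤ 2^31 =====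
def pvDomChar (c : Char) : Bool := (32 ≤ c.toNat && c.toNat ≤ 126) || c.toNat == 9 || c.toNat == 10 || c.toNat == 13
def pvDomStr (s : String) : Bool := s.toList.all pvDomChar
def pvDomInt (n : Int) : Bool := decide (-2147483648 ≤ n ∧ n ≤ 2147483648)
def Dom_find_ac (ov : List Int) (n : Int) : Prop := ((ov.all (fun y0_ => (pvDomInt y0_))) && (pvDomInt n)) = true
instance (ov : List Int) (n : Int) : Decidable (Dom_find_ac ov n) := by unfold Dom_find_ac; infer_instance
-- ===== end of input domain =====

-- B walks maximal runs of equal truthiness (groupby) instead of A's per-element counter; same cost, different decomposition.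

-- ===== PORT A =====
-- A's loop: index i, consecutive-truthy counter c; early return i when c reaches n.
def findAcAux (ov : List Int) (n : Int) (i : Nat) (c : Int) : Int :=
  match ov with
  | [] => 0
  | o :: rest =>
    if o ≠ 0 then
      if c + 1 ≥ n then (i : Int)
      else findAcAux rest n (i + 1) (c + 1)
    else findAcAux rest n (i + 1) 0

def find_ac (ov : List Int) (n : Int) : Int := findAcAux ov n 0 0

-- ===== PORT B =====
-- Source B's groupby(ov, key=bool) yields maximal runs of equal truthiness; this walks them one run at a time.
def find_ac_altAux (ov : List Int) (n : Int) (base : Nat) : Int :=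
  match ov with
  | [] => 0
  | o :: rest =>
    let t : Bool := o != 0
    let run : Nat := 1 + (rest.takeWhile (fun x => (x != 0) == t)).length
    if t && decide ((run : Int) ≥ n) then (base : Int) + n - 1
    else find_ac_altAux (rest.dropWhile (fun x => (x != 0) == t)) n (base + run)
termination_by ov.length
decreasing_by
  simp only [List.length_cons]
  exact Nat.lt_succ_of_le (rest.length_dropWhile_le _)

def find_ac_alt (ov : List Int) (n : Int) : Int := find_ac_altAux ov n 0

-- ===== PRECONDITION & SPEC =====
-- Pre_ restricts n to the natural domain n ≥ 1 (a count of consecutive truthy values): for n ≤ 0 A still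
-- returns, but its value (the index of the first truthy element) is an artefact of its counter test.
def Pre_find_ac (ov : List Int) (n : Int) : Prop := 1 ≤ n
instance (ov : List Int) (n : Int) : Decidable (Pre_find_ac ov n) := by unfold Pre_find_ac; infer_instance
def pvWitness_find_ac : List Int × Int := ([0, 5, 7, 7, 0, 1], 3)

def Spec_find_ac (ov : List Int) (n : Int) (out : Int) : Prop := out = find_ac_alt ov n
instance (ov : List Int) (n : Int) (out : Int) : Decidable (Spec_find_ac ov n out) := by unfold Spec_find_ac; infer_instance

-- ===== CLAIM (what is proved, stated in full; the proofs are below) =====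
def Claim_equal_find_ac : Prop := ∀ (ov : List Int) (n : Int), Dom_find_ac ov n → Pre_find_ac ov n → Spec_find_ac ov n (find_ac ov n)

-- ===== LEMMAS AND PROOFS =====

-- A inside a fully-truthy prefix ts (counter c ≥ 0): returns i + max (n-c-1) 0 iff the run reaches n.
lemma findAcAux_truthy (ts rest : List Int) (n : Int) (i : Nat) (c : Int)
    (hts : ∀ x ∈ ts, x ≠ 0) (hc : 0 ≤ c) :
    findAcAux (ts ++ rest) n i c =
      if (ts.length : Int) ≥ max (n - c) 1 then (i : Int) + max (n - c - 1) 0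
      else findAcAux rest n (i + ts.length) (c + ts.length) := by
  induction ts generalizing i c with
  | nil => simp
  | cons o ts ih =>
    have ho : o ≠ 0 := hts o (by simp)
    simp only [List.cons_append, findAcAux, if_pos ho, List.length_cons]
    by_cases h1 : c + 1 ≥ n
    · rw [if_pos h1]
      have : ((ts.length + 1 : Nat) : Int) ≥ max (n - c) 1 := by push_cast; omega
      rw [if_pos this]
      have : max (n - c - 1) 0 = 0 := by omega
      simp [this]
    · rw [if_neg h1, ih _ _ (fun x hx => hts x (by simp [hx])) (by omega)]
      push_cast
      by_cases h2 : (ts.length : Int) ≥ max (n - (c + 1)) 1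
      · rw [if_pos h2, if_pos (by omega)]
        have : max (n - (c + 1) - 1) 0 = n - c - 2 := by omega
        have h3 : max (n - c - 1) 0 = n - c - 1 := by omega
        rw [this, h3]
        omega
      · rw [if_neg h2, if_neg (by omega)]
        congr 1 <;> omega

-- A resets the counter on a falsy head: initial c is irrelevant.
lemma findAcAux_falsy_head (o : Int) (rest : List Int) (n : Int) (i : Nat) (c : Int)
    (ho : o = 0) : findAcAux (o :: rest) n i c = findAcAux rest n (i + 1) 0 := by
  simp [findAcAux, ho]

-- after a falsy prefix fs (nonempty), A continues with counter 0.
lemma findAcAux_falsy (fs rest : List Int) (n : Int) (i : Nat) (c : Int)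
    (hfs : ∀ x ∈ fs, x = 0) (hne : fs ≠ []) :
    findAcAux (fs ++ rest) n i c = findAcAux rest n (i + fs.length) 0 := by
  induction fs generalizing i c with
  | nil => exact absurd rfl hne
  | cons o fs ih =>
    have ho : o = 0 := hfs o (by simp)
    rw [List.cons_append, findAcAux_falsy_head o _ n i c ho]
    rcases fs with _ | ⟨f, fs'⟩
    · simp
    · rw [ih _ _ (fun x hx => hfs x (by simp [hx])) (by simp)]
      congr 1
      simp only [List.length_cons]
      omega

-- main lemma (n ≥ 1): with counter 0 A's aux equals B's run-walking aux.
lemma aux_eq (ov : List Int) (n : Int) (hn : 1 ≤ n) (i : Nat) :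
    findAcAux ov n i 0 = find_ac_altAux ov n i := by
  induction hl : ov.length using Nat.strong_induction_on generalizing ov i with
  | _ L IH =>
  match ov with
  | [] => simp [findAcAux, find_ac_altAux]
  | o :: rest =>
    rw [find_ac_altAux]
    by_cases ho : o ≠ 0
    · -- truthy head: whole leading truthy run
      have ht : (o != 0) = true := by simpa using ho
      have hsplit : o :: rest =
          (o :: rest.takeWhile (fun x => (x != 0) == true)) ++
            rest.dropWhile (fun x => (x != 0) == true) := by
        simp [List.takeWhile_append_dropWhile]
      have htruthy : ∀ x ∈ o :: rest.takeWhile (fun x => (x != 0) == true), x ≠ 0 := by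
        intro x hx
        rcases List.mem_cons.mp hx with h | h
        · simpa [h] using ho
        · have := List.mem_takeWhile_imp h
          simpa using this
      rw [hsplit, findAcAux_truthy _ _ n i 0 htruthy le_rfl]
      simp only [ht, Bool.true_and, List.length_cons, sub_zero]
      by_cases hc : ((1 + (rest.takeWhile (fun x => (x != 0) == true)).length : Nat) : Int) ≥ n
      · rw [if_pos (by push_cast at hc ⊢; omega), if_pos (by simpa using hc)]
        have : max (n - 1) 0 = n - 1 := by omega
        rw [this]
        ring
      · rw [if_neg (by push_cast at hc ⊢; omega), if_neg (by simpa using hc)]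
        -- A continues on the dropped part with a stale counter; its head is falsy or empty
        set rest' := rest.dropWhile (fun x => (x != 0) == true) with hrest'
        have hcnt : findAcAux rest' n (i + ((rest.takeWhile (fun x => (x != 0) == true)).length + 1)) ((0 : Int) + ((rest.takeWhile (fun x => (x != 0) == true)).length + 1 : Nat)) = findAcAux rest' n (i + ((rest.takeWhile (fun x => (x != 0) == true)).length + 1)) 0 := by
          rcases h' : rest' with _ | ⟨r, rs⟩
          · simp [findAcAux]
          · have hr : r = 0 := by
              have := List.head?_dropWhile_not (fun x => (x != 0) == true) rest
              rw [← hrest'] at this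
              simp [h'] at this
              simpa using this
            rw [findAcAux_falsy_head r rs n _ _ hr, findAcAux_falsy_head r rs n _ _ hr]
        rw [hcnt,
          IH rest'.length (by
            have h1 : rest'.length ≤ rest.length := rest.length_dropWhile_le _
            simp only [← hl, List.length_cons]; omega) rest' _ rfl]
        congr 1
        omega
    · -- falsy head: whole leading falsy run
      rw [not_not] at ho
      have ht : (o != 0) = false := by simp [ho]
      have hsplit : o :: rest =
          (o :: rest.takeWhile (fun x => (x != 0) == false)) ++
            rest.dropWhile (fun x => (x != 0) == false) := by
        simp [List.takeWhile_append_dropWhile]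
      have hfalsy : ∀ x ∈ o :: rest.takeWhile (fun x => (x != 0) == false), x = 0 := by
        intro x hx
        rcases List.mem_cons.mp hx with h | h
        · simpa [h] using ho
        · have := List.mem_takeWhile_imp h
          simpa using this
      rw [hsplit, findAcAux_falsy _ _ n i 0 hfalsy (by simp)]
      simp only [ht, Bool.false_and]
      rw [if_neg (by simp)]
      rw [IH (rest.dropWhile (fun x => (x != 0) == false)).length (by
          have h1 : (rest.dropWhile (fun x => (x != 0) == false)).length ≤ rest.length := rest.length_dropWhile_le _
          simp only [← hl, List.length_cons]; omega) _ _ rfl]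
      congr 1
      simp only [List.length_cons]
      omega

-- ===== VERDICT (by name: the statement is the Claim_ definition above) =====
theorem find_ac_spec : Claim_equal_find_ac := by
  intro ov n _ hn
  unfold Spec_find_ac find_ac find_ac_alt
  exact aux_eq ov n hn 0
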